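-- pv_equiv track=rewrite | github.com/Qs20051022/bilibili_project | bilibili_lib.py | sort_info_list
-- ===== SOURCE A (Python) =====
-- def sort_info_list(info_list):
--     new_info_list = []
--     for i in range(len(info_list)):
--         if info_list[i][-1] == 1:  # 番剧电影
--             new_info_list.append(info_list[i])
--     for i in range(len(info_list)):
--         if info_list[i][-1] == 5:  # 番剧电影贴片
--             new_info_list.append(info_list[i])
--     for i in range(len(info_list)):
--         if info_list[i][-1] == 3:  # 合集视频
--             new_info_list.append(info_list[i])
--     for i in range(len(info_list)):
--         if info_list[i][-1] == 2:  # 分集视频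
--             new_info_list.append(info_list[i])
--     for i in range(len(info_list)):
--         if info_list[i][-1] == 0:  # 一般视频
--             new_info_list.append(info_list[i])
--     for i in range(len(info_list)):
--         if info_list[i][-1] == 4:  # 嵌套合集
--             new_info_list.append(info_list[i])
--     return new_info_list
-- ===== SOURCE B (Python) =====
-- def sort_info_list(info_list):
--     # one pass: bucket by category code, then concatenate in priority order
--     buckets = {c: [] for c in (1, 5, 3, 2, 0, 4)}
--     for info in info_list:
--         c = info[-1]
--         if c in buckets:
--             buckets[c].append(info)
--     return [info for b in buckets.values() for info in b]
-- ===== Notes on version B (the rewrite author's own statement) =====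
-- stated objective: simpler
-- what changed: A makes six separate passes over the list, one per category code; B makes a single pass that buckets items by their last element into a fixed-key dict and then concatenates the buckets in priority order [1,5,3,2,0,4].
import Mathlib
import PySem

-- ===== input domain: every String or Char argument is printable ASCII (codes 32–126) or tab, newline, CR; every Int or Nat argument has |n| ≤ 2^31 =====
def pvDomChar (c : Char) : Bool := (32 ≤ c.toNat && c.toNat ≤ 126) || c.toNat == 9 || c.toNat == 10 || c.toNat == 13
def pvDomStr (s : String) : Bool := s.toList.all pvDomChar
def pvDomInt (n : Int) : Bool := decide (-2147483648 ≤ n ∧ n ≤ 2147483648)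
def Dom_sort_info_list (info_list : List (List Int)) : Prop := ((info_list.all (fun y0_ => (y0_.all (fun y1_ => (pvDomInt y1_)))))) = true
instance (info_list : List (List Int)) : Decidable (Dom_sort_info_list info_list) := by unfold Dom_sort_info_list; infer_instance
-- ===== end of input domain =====

-- B replaces A's six passes (one per category code) by a single bucketing pass; return-value equivalence only.

-- ===== PORT A =====
-- x[-1]; exact when x ≠ [] (Pre_ guarantees this; Python raises IndexError on [])
def pvLastA (x : List Int) : Int := (PySem.List.pyGet? x (-1)).getD 0

-- one 'for i in range(len(info_list)): if info_list[i][-1] == k: new_info_list.append(info_list[i])' pass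
def pvPassA (info_list : List (List Int)) (k : Int) (acc : List (List Int)) : List (List Int) :=
  (PySem.List.pyRange 0 info_list.length 1).foldl
    (fun acc i =>
      if pvLastA (PySem.List.pyGetD info_list i []) = k
      then acc ++ [PySem.List.pyGetD info_list i []] else acc) acc

def sort_info_list (info_list : List (List Int)) : List (List Int) :=
  pvPassA info_list 4 (pvPassA info_list 0 (pvPassA info_list 2 (pvPassA info_list 3
    (pvPassA info_list 5 (pvPassA info_list 1 [])))))

-- ===== PORT B =====
-- x[-1]; exact when x ≠ []
def pvLastB (x : List Int) : Int := (PySem.List.pyGet? x (-1)).getD 0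

-- the six dict buckets, keys fixed at (1, 5, 3, 2, 0, 4); 'c in buckets' is the key test chain
def pvStepB (b : List (List Int) × List (List Int) × List (List Int) × List (List Int) ×
              List (List Int) × List (List Int)) (info : List Int) :
    List (List Int) × List (List Int) × List (List Int) × List (List Int) ×
    List (List Int) × List (List Int) :=
  let c := pvLastB info
  if c = 1 then (b.1 ++ [info], b.2.1, b.2.2.1, b.2.2.2.1, b.2.2.2.2.1, b.2.2.2.2.2)
  else if c = 5 then (b.1, b.2.1 ++ [info], b.2.2.1, b.2.2.2.1, b.2.2.2.2.1, b.2.2.2.2.2)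
  else if c = 3 then (b.1, b.2.1, b.2.2.1 ++ [info], b.2.2.2.1, b.2.2.2.2.1, b.2.2.2.2.2)
  else if c = 2 then (b.1, b.2.1, b.2.2.1, b.2.2.2.1 ++ [info], b.2.2.2.2.1, b.2.2.2.2.2)
  else if c = 0 then (b.1, b.2.1, b.2.2.1, b.2.2.2.1, b.2.2.2.2.1 ++ [info], b.2.2.2.2.2)
  else if c = 4 then (b.1, b.2.1, b.2.2.1, b.2.2.2.1, b.2.2.2.2.1, b.2.2.2.2.2 ++ [info])
  else b

def sort_info_list_alt (info_list : List (List Int)) : List (List Int) :=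
  let b := info_list.foldl pvStepB ([], [], [], [], [], [])
  b.1 ++ b.2.1 ++ b.2.2.1 ++ b.2.2.2.1 ++ b.2.2.2.2.1 ++ b.2.2.2.2.2

-- ===== PRECONDITION & SPEC =====
-- Pre_ excludes lists containing an empty inner list: both Pythons raise IndexError on x[-1] there.
def Pre_sort_info_list (info_list : List (List Int)) : Prop :=
  (info_list.all (fun x => !x.isEmpty)) = true
instance (info_list : List (List Int)) : Decidable (Pre_sort_info_list info_list) := by
  unfold Pre_sort_info_list; infer_instance

def pvWitness_sort_info_list : List (List Int) := [[7, 1], [2], [5], [3, 0], [9]]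

def Spec_sort_info_list (info_list : List (List Int)) (out : List (List Int)) : Prop := out = sort_info_list_alt info_list
instance (info_list : List (List Int)) (out : List (List Int)) : Decidable (Spec_sort_info_list info_list out) := by unfold Spec_sort_info_list; infer_instance

-- ===== CLAIM (what is proved, stated in full; the proofs are below) =====
def Claim_equal_sort_info_list : Prop := ∀ (info_list : List (List Int)), Dom_sort_info_list info_list → Pre_sort_info_list info_list → Spec_sort_info_list info_list (sort_info_list info_list)

-- ===== LEMMAS AND PROOFS =====

-- each A-pass appends exactly the items whose last element is k, in order
theorem pvPassA_eq_filter (info_list : List (List Int)) (k : Int) (acc : List (List Int)) :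
    pvPassA info_list k acc = acc ++ info_list.filter (fun x => pvLastA x = k) := by
  unfold pvPassA
  rw [show ((info_list.length : Int)) = PySem.List.len info_list from rfl,
      PySem.List.foldl_pyRange_pyGetD (a := 0) (xs := info_list)
        (f := fun acc x => if pvLastA x = k then acc ++ [x] else acc) (d := []) (init := acc)
        (by norm_num)]
  simp [PySem.List.foldl_append_ite_eq_filter]

-- B's fold accumulates each bucket as the corresponding filter
theorem pvFoldB_eq_filters (info_list : List (List Int))
    (b1 b5 b3 b2 b0 b4 : List (List Int)) :
    info_list.foldl pvStepB (b1, b5, b3, b2, b0, b4) =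
      (b1 ++ info_list.filter (fun x => pvLastB x = 1),
       b5 ++ info_list.filter (fun x => pvLastB x = 5),
       b3 ++ info_list.filter (fun x => pvLastB x = 3),
       b2 ++ info_list.filter (fun x => pvLastB x = 2),
       b0 ++ info_list.filter (fun x => pvLastB x = 0),
       b4 ++ info_list.filter (fun x => pvLastB x = 4)) := by
  induction info_list generalizing b1 b5 b3 b2 b0 b4 with
  | nil => simp
  | cons x xs ih =>
    simp only [List.foldl_cons, List.filter_cons]
    by_cases h1 : pvLastB x = 1
    · simp [pvStepB, h1, ih]
    · by_cases h5 : pvLastB x = 5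
      · simp [pvStepB, h5, ih]
      · by_cases h3 : pvLastB x = 3
        · simp [pvStepB, h3, ih]
        · by_cases h2 : pvLastB x = 2
          · simp [pvStepB, h2, ih]
          · by_cases h0 : pvLastB x = 0
            · simp [pvStepB, h0, ih]
            · by_cases h4 : pvLastB x = 4
              · simp [pvStepB, h4, ih]
              · simp [pvStepB, h1, h5, h3, h2, h0, h4, ih]

-- ===== VERDICT (by name: the statement is the Claim_ definition above) =====
theorem sort_info_list_spec : Claim_equal_sort_info_list := by
  intro info_list _ _
  unfold Spec_sort_info_list sort_info_list sort_info_list_alt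
  simp only [pvPassA_eq_filter, pvFoldB_eq_filters]
  simp only [pvLastA, pvLastB, List.nil_append, List.append_assoc]
  rfl
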